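-- pv_equiv track=rewrite | github.com/atulXdev/LeadTwin-Ai | tools/scrape_site.py | _detect_key_pages
-- ===== SOURCE A (Python) =====
-- def _detect_key_pages(links: list[str], base_url: str) -> dict:
--     """Detect if the site has key pages (hiring, pricing, blog, about, contact)."""
--     pages = {
--         "hiring": False,
--         "pricing": False,
--         "blog": False,
--         "about": False,
--         "contact": False,
--         "services": False,
--     }
--
--     keywords_map = {
--         "hiring": ["career", "careers", "jobs", "hiring", "join-us", "join-our-team", "work-with-us"],
--         "pricing": ["pricing", "plans", "packages"],
--         "blog": ["blog", "insights", "articles", "news", "resources"],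
--         "about": ["about", "about-us", "our-story", "company"],
--         "contact": ["contact", "contact-us", "get-in-touch"],
--         "services": ["services", "solutions", "products", "offerings", "what-we-do"],
--     }
--
--     links_lower = [l.lower() for l in links]
--
--     for page_type, keywords in keywords_map.items():
--         for keyword in keywords:
--             if any(keyword in link for link in links_lower):
--                 pages[page_type] = True
--                 break
--
--     return pages
-- ===== SOURCE B (Python) =====
-- _KEYWORDS = {
--     "hiring": ("career", "careers", "jobs", "hiring", "join-us", "join-our-team", "work-with-us"),
--     "pricing": ("pricing", "plans", "packages"),
--     "blog": ("blog", "insights", "articles", "news", "resources"),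
--     "about": ("about", "about-us", "our-story", "company"),
--     "contact": ("contact", "contact-us", "get-in-touch"),
--     "services": ("services", "solutions", "products", "offerings", "what-we-do"),
-- }
--
--
-- def _detect_key_pages(links: list[str], base_url: str) -> dict:
--     """Single forward pass over the links, or-ing each page-type flag as we go."""
--     hiring = pricing = blog = about = contact = services = False
--     for link in links:
--         ll = link.lower()
--         hiring = hiring or any(k in ll for k in _KEYWORDS["hiring"])
--         pricing = pricing or any(k in ll for k in _KEYWORDS["pricing"])
--         blog = blog or any(k in ll for k in _KEYWORDS["blog"])
--         about = about or any(k in ll for k in _KEYWORDS["about"])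
--         contact = contact or any(k in ll for k in _KEYWORDS["contact"])
--         services = services or any(k in ll for k in _KEYWORDS["services"])
--     return {
--         "hiring": hiring,
--         "pricing": pricing,
--         "blog": blog,
--         "about": about,
--         "contact": contact,
--         "services": services,
--     }
-- ===== Notes on version B (the rewrite author's own statement) =====
-- stated objective: alternative
-- what changed: Replaces A's per-page-type, per-keyword rescans of the whole link list (with break) by a single forward pass over the links that lowercases each link once and or-accumulates all six page-type flags.
import Mathlib
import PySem

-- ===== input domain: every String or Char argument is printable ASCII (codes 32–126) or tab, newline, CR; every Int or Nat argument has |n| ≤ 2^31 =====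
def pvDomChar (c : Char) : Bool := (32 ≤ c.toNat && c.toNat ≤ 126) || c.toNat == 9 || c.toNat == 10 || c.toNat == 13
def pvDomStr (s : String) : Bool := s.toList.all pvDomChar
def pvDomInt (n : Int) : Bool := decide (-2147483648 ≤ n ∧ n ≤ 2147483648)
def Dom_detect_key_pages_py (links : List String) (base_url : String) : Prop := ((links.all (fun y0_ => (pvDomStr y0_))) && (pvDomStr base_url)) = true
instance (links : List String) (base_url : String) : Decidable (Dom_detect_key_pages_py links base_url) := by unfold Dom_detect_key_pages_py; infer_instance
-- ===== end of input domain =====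

-- B replaces A's per-type keyword rescans (with break) by one forward pass over the
-- links that or-accumulates all six page-type flags; alternative decomposition, same cost.


-- ===== PORT A =====
-- inner 'for keyword in keywords: if any(...): pages[pt]=True; break'
def pvLoopA (links_lower : List String) (pt : String) (pages : PySem.Dict String Bool) :
    List String → PySem.Dict String Bool
  | [] => pages
  | kw :: rest =>
    if links_lower.any (fun link => PySem.Str.isIn kw link) then pages.insert pt true
    else pvLoopA links_lower pt pages rest

def detect_key_pages_py (links : List String) (_base_url : String) : List (String × Bool) :=
  let pages : PySem.Dict String Bool :=
    PySem.Dict.ofList [("hiring", false), ("pricing", false), ("blog", false),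
                       ("about", false), ("contact", false), ("services", false)]
  let keywords_map : List (String × List String) :=
    [("hiring", ["career", "careers", "jobs", "hiring", "join-us", "join-our-team", "work-with-us"]),
     ("pricing", ["pricing", "plans", "packages"]),
     ("blog", ["blog", "insights", "articles", "news", "resources"]),
     ("about", ["about", "about-us", "our-story", "company"]),
     ("contact", ["contact", "contact-us", "get-in-touch"]),
     ("services", ["services", "solutions", "products", "offerings", "what-we-do"])]
  let links_lower := links.map PySem.Str.lower
  let pages := keywords_map.foldl (fun pg ptkws => pvLoopA links_lower ptkws.1 pg ptkws.2) pages
  pages.items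

-- ===== PORT B =====
def pvKwHiring : List String := ["career", "careers", "jobs", "hiring", "join-us", "join-our-team", "work-with-us"]
def pvKwPricing : List String := ["pricing", "plans", "packages"]
def pvKwBlog : List String := ["blog", "insights", "articles", "news", "resources"]
def pvKwAbout : List String := ["about", "about-us", "our-story", "company"]
def pvKwContact : List String := ["contact", "contact-us", "get-in-touch"]
def pvKwServices : List String := ["services", "solutions", "products", "offerings", "what-we-do"]

-- any(k in ll for k in kws)
def pvAnyKw (ll : String) (kws : List String) : Bool := kws.any (fun k => PySem.Str.isIn k ll)

def pvStepB (st : Bool × Bool × Bool × Bool × Bool × Bool) (link : String) :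
    Bool × Bool × Bool × Bool × Bool × Bool :=
  let ll := PySem.Str.lower link
  (st.1 || pvAnyKw ll pvKwHiring,
   st.2.1 || pvAnyKw ll pvKwPricing,
   st.2.2.1 || pvAnyKw ll pvKwBlog,
   st.2.2.2.1 || pvAnyKw ll pvKwAbout,
   st.2.2.2.2.1 || pvAnyKw ll pvKwContact,
   st.2.2.2.2.2 || pvAnyKw ll pvKwServices)

def detect_key_pages_py_alt (links : List String) (_base_url : String) : List (String × Bool) :=
  let st := links.foldl pvStepB (false, false, false, false, false, false)
  [("hiring", st.1), ("pricing", st.2.1), ("blog", st.2.2.1),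
   ("about", st.2.2.2.1), ("contact", st.2.2.2.2.1), ("services", st.2.2.2.2.2)]

-- ===== PRECONDITION & SPEC =====
def Spec_detect_key_pages_py (links : List String) (base_url : String) (out : List (String × Bool)) : Prop := out = detect_key_pages_py_alt links base_url
instance (links : List String) (base_url : String) (out : List (String × Bool)) : Decidable (Spec_detect_key_pages_py links base_url out) := by unfold Spec_detect_key_pages_py; infer_instance

-- ===== CLAIM (what is proved, stated in full; the proofs are below) =====
def Claim_equal_detect_key_pages_py : Prop := ∀ (links : List String) (base_url : String), Dom_detect_key_pages_py links base_url → Spec_detect_key_pages_py links base_url (detect_key_pages_py links base_url)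

-- ===== LEMMAS AND PROOFS =====

def pvCondIns (pg : PySem.Dict String Bool) (pt : String) (b : Bool) : PySem.Dict String Bool :=
  if b then pg.insert pt true else pg

theorem pvLoopA_eq (ll : List String) (pt : String) (pg : PySem.Dict String Bool) :
    ∀ kws : List String,
      pvLoopA ll pt pg kws = pvCondIns pg pt (kws.any (fun kw => ll.any (fun l => PySem.Str.isIn kw l)))
  | [] => by simp [pvLoopA, pvCondIns]
  | kw :: rest => by
    by_cases h : ∃ x ∈ ll, PySem.Chars.isIn kw.toList x.toList = true
    · simp [pvLoopA, pvCondIns, h]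
    · simp [pvLoopA, pvCondIns, h, pvLoopA_eq ll pt pg rest]

theorem pvDict6 (a1 a2 a3 a4 a5 a6 : Bool) :
    (pvCondIns (pvCondIns (pvCondIns (pvCondIns (pvCondIns (pvCondIns
        (PySem.Dict.ofList [("hiring", false), ("pricing", false), ("blog", false),
                            ("about", false), ("contact", false), ("services", false)])
        "hiring" a1) "pricing" a2) "blog" a3) "about" a4) "contact" a5) "services" a6).items
      = [("hiring", a1), ("pricing", a2), ("blog", a3),
         ("about", a4), ("contact", a5), ("services", a6)] := by
  revert a1 a2 a3 a4 a5 a6; decide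

theorem pvFoldB (links : List String) :
    ∀ b1 b2 b3 b4 b5 b6 : Bool,
      links.foldl pvStepB (b1, b2, b3, b4, b5, b6) =
        (b1 || links.any (fun l => pvAnyKw (PySem.Str.lower l) pvKwHiring),
         b2 || links.any (fun l => pvAnyKw (PySem.Str.lower l) pvKwPricing),
         b3 || links.any (fun l => pvAnyKw (PySem.Str.lower l) pvKwBlog),
         b4 || links.any (fun l => pvAnyKw (PySem.Str.lower l) pvKwAbout),
         b5 || links.any (fun l => pvAnyKw (PySem.Str.lower l) pvKwContact),
         b6 || links.any (fun l => pvAnyKw (PySem.Str.lower l) pvKwServices)) := by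
  induction links with
  | nil => intro b1 b2 b3 b4 b5 b6; simp
  | cons l t ih =>
    intro b1 b2 b3 b4 b5 b6
    simp only [List.foldl_cons, pvStepB, List.any_cons, ih, Bool.or_assoc]

theorem pvAnySwap {α β : Type} (xs : List α) (ys : List β) (p : α → β → Bool) :
    xs.any (fun x => ys.any (fun y => p x y)) = ys.any (fun y => xs.any (fun x => p x y)) := by
  rw [Bool.eq_iff_iff]
  simp only [List.any_eq_true]
  tauto

theorem pvFlag (links : List String) (kws : List String) :
    kws.any (fun kw => (links.map PySem.Str.lower).any (fun l => PySem.Str.isIn kw l)) =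
      links.any (fun l => pvAnyKw (PySem.Str.lower l) kws) := by
  simp only [List.any_map, pvAnyKw]
  exact pvAnySwap kws links (fun kw l => PySem.Str.isIn kw (PySem.Str.lower l))

-- ===== VERDICT (by name: the statement is the Claim_ definition above) =====
theorem detect_key_pages_py_spec : Claim_equal_detect_key_pages_py := by
  intro links base_url _
  show detect_key_pages_py links base_url = detect_key_pages_py_alt links base_url
  unfold detect_key_pages_py detect_key_pages_py_alt
  simp only [List.foldl_cons, List.foldl_nil, pvLoopA_eq, pvFoldB, Bool.false_or, pvFlag, pvDict6, pvKwHiring, pvKwPricing, pvKwBlog, pvKwAbout, pvKwContact, pvKwServices]
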